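-- pv_equiv track=rewrite | github.com/jojonicho/algorithms | rea/a.py | jumlah_dolby_ditelpon
-- ===== SOURCE A (Python) =====
-- DOWN = "0"
--
-- def jumlah_dolby_ditelpon(s):
--     # 5 menit berturut turut
--     minutes_down = 0
--     phone_count = 0
--     for c in s:
--         if c == DOWN:
--             minutes_down += 1
--         else:
--             if minutes_down >= 5:
--                 phone_count += 1
--             minutes_down = 0
--     if minutes_down >= 5:
--         phone_count += 1
--     return phone_count
-- ===== SOURCE B (Python) =====
-- DOWN = "0"
--
-- def jumlah_dolby_ditelpon(s):
--     # group-then-filter: scan maximal runs of equal characters,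
--     # count runs of DOWN with length >= 5
--     phone_count = 0
--     i, n = 0, len(s)
--     while i < n:
--         j = i
--         while j < n and s[j] == s[i]:
--             j += 1
--         if s[i] == DOWN and j - i >= 5:
--             phone_count += 1
--         i = j
--     return phone_count
-- ===== Notes on version B (the rewrite author's own statement) =====
-- stated objective: alternative
-- what changed: Replaces A's running-counter state machine with after-loop flush by a run-grouping scan: advance over each maximal run of equal characters and count the run when it is '0'-run of length >= 5.
import Mathlib
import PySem

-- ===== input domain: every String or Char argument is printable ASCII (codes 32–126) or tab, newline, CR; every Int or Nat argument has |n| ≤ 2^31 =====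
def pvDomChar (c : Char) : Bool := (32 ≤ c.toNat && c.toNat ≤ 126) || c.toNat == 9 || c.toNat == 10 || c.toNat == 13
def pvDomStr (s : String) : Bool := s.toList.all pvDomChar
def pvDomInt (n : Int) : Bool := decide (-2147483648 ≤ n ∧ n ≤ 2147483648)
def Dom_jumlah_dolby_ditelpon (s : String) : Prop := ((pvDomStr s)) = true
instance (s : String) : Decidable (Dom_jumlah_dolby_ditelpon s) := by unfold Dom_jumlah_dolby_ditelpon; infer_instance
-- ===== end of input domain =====

-- B replaces A's running-counter state machine (with after-loop flush) by a run-grouping scan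
-- over maximal runs of equal characters; same cost, alternative structure.


-- ===== PORT A =====
-- the loop body: c == DOWN increments minutes_down, otherwise flush-and-reset
def jdStep (st : Int × Int) (c : Char) : Int × Int :=
  if c == '0' then (st.1 + 1, st.2)
  else (0, if st.1 ≥ 5 then st.2 + 1 else st.2)

def jumlah_dolby_ditelpon (s : String) : Int :=
  let st := s.toList.foldl jdStep (0, 0)
  if st.1 ≥ 5 then st.2 + 1 else st.2

-- ===== PORT B =====
-- B's outer while: take the maximal run of characters equal to the current one,
-- count it if it is a '0'-run of length ≥ 5, continue after the run.
def jdRuns : List Char → Int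
  | [] => 0
  | c :: rest =>
    let run := rest.takeWhile (· == c)
    let rest' := rest.dropWhile (· == c)
    (if c = '0' ∧ 5 ≤ run.length + 1 then 1 else 0) + jdRuns rest'
termination_by l => l.length
decreasing_by
  simp only [List.length_cons]
  exact Nat.lt_succ_of_le (List.length_dropWhile_le _ _)

def jumlah_dolby_ditelpon_alt (s : String) : Int := jdRuns s.toList

-- ===== PRECONDITION & SPEC =====
def Spec_jumlah_dolby_ditelpon (s : String) (out : Int) : Prop := out = jumlah_dolby_ditelpon_alt s
instance (s : String) (out : Int) : Decidable (Spec_jumlah_dolby_ditelpon s out) := by unfold Spec_jumlah_dolby_ditelpon; infer_instance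

-- ===== CLAIM (what is proved, stated in full; the proofs are below) =====
def Claim_equal_jumlah_dolby_ditelpon : Prop := ∀ (s : String), Dom_jumlah_dolby_ditelpon s → Spec_jumlah_dolby_ditelpon s (jumlah_dolby_ditelpon s)

-- ===== LEMMAS AND PROOFS =====

-- the after-loop flush of A
def jdFlush (st : Int × Int) : Int := if st.1 ≥ 5 then st.2 + 1 else st.2

lemma jdStep_zero (st : Int × Int) : jdStep st '0' = (st.1 + 1, st.2) := by
  simp [jdStep]

lemma jdStep_nonzero {c : Char} (h : c ≠ '0') (st : Int × Int) :
    jdStep st c = (0, if st.1 ≥ 5 then st.2 + 1 else st.2) := by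
  simp [jdStep, h]

lemma jdFlush_add (l : List Char) (m p : Int) :
    jdFlush (l.foldl jdStep (m, p)) = p + jdFlush (l.foldl jdStep (m, 0)) := by
  induction l generalizing m p with
  | nil => simp only [List.foldl_nil, jdFlush]; split <;> ring
  | cons c t ih =>
    rw [List.foldl_cons, List.foldl_cons]
    by_cases h : c = '0'
    · subst h; rw [jdStep_zero, jdStep_zero]; exact ih (m + 1) p
    · rw [jdStep_nonzero h, jdStep_nonzero h]
      split_ifs with hm
      · rw [ih 0 (p + 1), ih 0 (0 + 1)]; ring
      · exact ih 0 p

lemma jdFoldl_zeros (l : List Char) (h : ∀ x ∈ l, x = '0') (m p : Int) :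
    l.foldl jdStep (m, p) = (m + l.length, p) := by
  induction l generalizing m with
  | nil => simp
  | cons c t ih =>
    have hc : c = '0' := h c (by simp)
    rw [List.foldl_cons, hc, jdStep_zero]
    rw [ih (fun x hx => h x (by simp [hx])) (m + 1)]
    simp only [List.length_cons, Prod.mk.injEq]
    exact ⟨by push_cast; ring, trivial⟩

lemma jdFoldl_nonzeros (l : List Char) (h : ∀ x ∈ l, x ≠ '0') (p : Int) :
    l.foldl jdStep (0, p) = (0, p) := by
  induction l with
  | nil => rfl
  | cons c t ih =>
    have hc : c ≠ '0' := h c (by simp)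
    rw [List.foldl_cons, jdStep_nonzero hc, if_neg (by norm_num : ¬(0:Int) ≥ 5)]
    exact ih (fun x hx => h x (by simp [hx]))

lemma jdDropWhile_head {p : Char → Bool} {l : List Char} {e : Char} {d : List Char}
    (h : l.dropWhile p = e :: d) : p e = false := by
  induction l with
  | nil => simp at h
  | cons c t ih =>
    rw [List.dropWhile_cons] at h
    split at h
    · exact ih h
    · cases h; simp_all

lemma jdMain (n : Nat) : ∀ l : List Char, l.length ≤ n →
    jdFlush (l.foldl jdStep (0, 0)) = jdRuns l := by
  induction n with
  | zero =>
    intro l hl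
    match l with
    | [] => simp [jdRuns, jdFlush]
    | _ :: _ => simp at hl
  | succ n ih =>
    intro l hl
    match l with
    | [] => simp [jdRuns, jdFlush]
    | c :: rest =>
      rw [jdRuns]
      set t := rest.takeWhile (· == c) with ht
      set d := rest.dropWhile (· == c) with hd
      have hsplit : t ++ d = rest := List.takeWhile_append_dropWhile
      have hdrest : d.length ≤ rest.length := by
        rw [hd]; exact List.length_dropWhile_le _ _
      have hdlen : d.length ≤ n := by
        simp only [List.length_cons] at hl; omega
      by_cases hc : c = '0'
      · subst hc
        have htz : ∀ x ∈ t, x = '0' := by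
          intro x hx
          have := List.mem_takeWhile_imp (ht ▸ hx)
          simpa using this
        have h1 : ('0' :: rest).foldl jdStep (0, 0) =
            d.foldl jdStep ((1 + (t.length : Int)), 0) := by
          conv_lhs => rw [← hsplit]
          rw [List.foldl_cons, List.foldl_append, jdStep_zero,
            jdFoldl_zeros t htz]
          norm_num
        rw [h1]
        have hb : (if '0' = '0' ∧ 5 ≤ t.length + 1 then (1 : Int) else 0) =
            (if (1 + (t.length : Int)) ≥ 5 then (1 : Int) else 0) := by
          rcases Nat.lt_or_ge (t.length + 1) 5 with h | h
          · rw [if_neg (by omega), if_neg (by omega)]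
          · rw [if_pos ⟨rfl, h⟩, if_pos (by omega)]
        rw [hb]
        match hde : d with
        | [] =>
          simp only [List.foldl_nil, jdFlush, jdRuns]
          split <;> ring
        | e :: d' =>
          have hcons : rest.dropWhile (· == '0') = e :: d' := hd.symm
          have he : e ≠ '0' := by simpa using jdDropWhile_head hcons
          rw [List.foldl_cons, jdStep_nonzero he]
          rw [jdFlush_add]
          have h2 : (e :: d').foldl jdStep (0, 0) = d'.foldl jdStep (0, 0) := by
            rw [List.foldl_cons, jdStep_nonzero he,
              if_neg (by norm_num : ¬(0:Int) ≥ 5)]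
          rw [← h2, ih (e :: d') hdlen]
          split <;> ring
      · have htnz : ∀ x ∈ t, x ≠ '0' := by
          intro x hx
          have := List.mem_takeWhile_imp (ht ▸ hx)
          simp at this; rw [this]; exact hc
        have h1 : (c :: rest).foldl jdStep (0, 0) = d.foldl jdStep (0, 0) := by
          conv_lhs => rw [← hsplit]
          rw [List.foldl_cons, List.foldl_append, jdStep_nonzero hc,
            if_neg (by norm_num : ¬(0:Int) ≥ 5), jdFoldl_nonzeros t htnz 0]
        rw [h1, ih d hdlen, if_neg (by simp [hc])]
        ring

-- ===== VERDICT (by name: the statement is the Claim_ definition above) =====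
theorem jumlah_dolby_ditelpon_spec : Claim_equal_jumlah_dolby_ditelpon := by
  intro s _
  unfold Spec_jumlah_dolby_ditelpon jumlah_dolby_ditelpon jumlah_dolby_ditelpon_alt
  exact jdMain s.toList.length s.toList le_rfl
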